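-- pv_equiv track=rewrite | github.com/technical-zebra/CP1404_practicals | prac5_KeZhang/emails.py | separate_name_from_email
-- ===== SOURCE A (Python) =====
-- def separate_name_from_email(email):
--     """Separate name from email."""
--     name = email.split("@")[0]
--     try:
--         names = name.split(".")
--         names = [name.title() for name in names]
--         name = " ".join(names)
--     except:
--         name = name.title()
--     return name
-- ===== SOURCE B (Python) =====
-- def separate_name_from_email(email):
--     """Separate name from email."""
--     out = []
--     prev_alpha = False
--     for c in email:
--         if c == "@":
--             break
--         if c == ".":
--             out.append(" ")
--             prev_alpha = False
--         elif c.isalpha():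
--             out.append(c.lower() if prev_alpha else c.upper())
--             prev_alpha = True
--         else:
--             out.append(c)
--             prev_alpha = False
--     return "".join(out)
-- ===== Notes on version B (the rewrite author's own statement) =====
-- stated objective: alternative
-- what changed: A splits the local part on '.', title-cases each piece and joins with spaces; B makes one stateful pass over the characters, stopping at '@', mapping '.' to ' ' and casing each letter from whether the previous character was a letter, building no intermediate lists.
import Mathlib
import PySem

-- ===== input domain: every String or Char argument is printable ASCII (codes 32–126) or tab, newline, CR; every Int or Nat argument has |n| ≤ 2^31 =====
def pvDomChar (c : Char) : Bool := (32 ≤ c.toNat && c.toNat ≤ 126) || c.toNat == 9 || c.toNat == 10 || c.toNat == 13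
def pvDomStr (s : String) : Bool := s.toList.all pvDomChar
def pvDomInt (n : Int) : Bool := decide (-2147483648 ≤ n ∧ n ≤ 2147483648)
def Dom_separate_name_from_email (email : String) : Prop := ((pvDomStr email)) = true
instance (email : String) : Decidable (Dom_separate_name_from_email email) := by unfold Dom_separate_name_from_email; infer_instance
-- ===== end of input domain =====

-- B replaces A's split('.') / per-piece title() / join(' ') pipeline with a single
-- stateful scan over the characters (no intermediate lists); objective: alternative.

-- ===== PORT A =====
-- str.title() is not in PySem; hand port, exact on the ASCII domain: a letter after a
-- non-letter is title-(=upper-)cased, a letter after a letter is lowercased, others unchanged.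
def pvTitleGo : Bool → List Char → List Char
  | _, [] => []
  | prev, c :: r =>
    if PySem.Chars.isalpha c then
      (if prev then PySem.Chars.lowerChar c else PySem.Chars.upperChar c) :: pvTitleGo true r
    else c :: pvTitleGo false r

def pvTitle (cs : List Char) : List Char := pvTitleGo false cs

def separate_name_from_email (email : String) : String :=
  -- name = email.split("@")[0]   (split always returns a nonempty list, so [0] is its head)
  let name := (PySem.Chars.splitOn email.toList ['@']).headD []
  -- names = name.split("."); names = [n.title() for n in names]; name = " ".join(names)
  -- (the except branch is dead code: none of these operations raises)
  let names := (PySem.Chars.splitOn name ['.']).map pvTitle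
  String.ofList (PySem.Chars.join [' '] names)

-- ===== PORT B =====
def pvAltGo : Bool → List Char → List Char
  | _, [] => []
  | prev, c :: r =>
    if c = '@' then []
    else if c = '.' then ' ' :: pvAltGo false r
    else if PySem.Chars.isalpha c then
      (if prev then PySem.Chars.lowerChar c else PySem.Chars.upperChar c) :: pvAltGo true r
    else c :: pvAltGo false r

def separate_name_from_email_alt (email : String) : String :=
  String.ofList (pvAltGo false email.toList)

-- ===== PRECONDITION & SPEC =====
def Spec_separate_name_from_email (email : String) (out : String) : Prop := out = separate_name_from_email_alt email
instance (email : String) (out : String) : Decidable (Spec_separate_name_from_email email out) := by unfold Spec_separate_name_from_email; infer_instance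

-- ===== CLAIM (what is proved, stated in full; the proofs are below) =====
def Claim_equal_separate_name_from_email : Prop := ∀ (email : String), Dom_separate_name_from_email email → Spec_separate_name_from_email email (separate_name_from_email email)

-- ===== LEMMAS AND PROOFS =====

-- pure recursive characterisation of split on a one-character separator
def pvSplit (d : Char) : List Char → List (List Char)
  | [] => [[]]
  | c :: r =>
    match pvSplit d r with
    | [] => [[c]]      -- unreachable: pvSplit is never []
    | h :: t => if c = d then [] :: h :: t else (c :: h) :: t

theorem pvSplit_ne_nil (d : Char) (cs : List Char) : pvSplit d cs ≠ [] := by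
  cases cs with
  | nil => simp [pvSplit]
  | cons c r =>
    simp only [pvSplit]
    cases pvSplit d r with
    | nil => simp
    | cons h t => split_ifs <;> simp

theorem pv_go_spec (d : Char) : ∀ (fuel : Nat) (l cur : List Char) (acc : List (List Char)),
    l.length < fuel →
    PySem.Chars.splitOn.go [d] fuel l cur acc =
      acc.reverse ++ (match pvSplit d l with
        | [] => []
        | h :: t => (cur.reverse ++ h) :: t) := by
  intro fuel
  induction fuel with
  | zero => intro l cur acc h; omega
  | succ f ih =>
    intro l cur acc h
    cases l with
    | nil => simp [PySem.Chars.splitOn.go, pvSplit]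
    | cons c r =>
      rw [PySem.Chars.splitOn.go]
      by_cases hc : c = d
      · have hpre : List.isPrefixOf [d] (c :: r) = true := by simp [List.isPrefixOf, hc]
        simp only [hpre, if_true, List.length_cons, List.drop_succ_cons, List.length_nil, List.drop_zero]
        rw [ih r [] (cur.reverse :: acc) (by simp at h ⊢; omega)]
        cases hs : pvSplit d r with
        | nil => exact absurd hs (pvSplit_ne_nil d r)
        | cons h0 t0 => simp [pvSplit, hs, hc]
      · have hpre : List.isPrefixOf [d] (c :: r) = false := by
          simp [List.isPrefixOf]
          exact fun hdc => absurd hdc.symm hc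
        simp only [hpre, Bool.false_eq_true, if_false]
        rw [ih r (c :: cur) acc (by simp at h ⊢; omega)]
        cases hs : pvSplit d r with
        | nil => exact absurd hs (pvSplit_ne_nil d r)
        | cons h0 t0 => simp [pvSplit, hs, hc]

theorem pv_splitOn_eq (d : Char) (cs : List Char) :
    PySem.Chars.splitOn cs [d] = pvSplit d cs := by
  unfold PySem.Chars.splitOn
  rw [pv_go_spec d (cs.length + 1) cs [] [] (by omega)]
  cases hs : pvSplit d cs with
  | nil => exact absurd hs (pvSplit_ne_nil d cs)
  | cons h t => simp

-- the head of split('@') is the prefix before the first '@'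
theorem pv_head_split_at (cs : List Char) :
    (pvSplit '@' cs).headD [] = cs.takeWhile (· ≠ '@') := by
  induction cs with
  | nil => simp [pvSplit]
  | cons c r ih =>
    simp only [pvSplit]
    cases hs : pvSplit '@' r with
    | nil => exact absurd hs (pvSplit_ne_nil '@' r)
    | cons h t =>
      rw [hs] at ih
      by_cases hc : c = '@'
      · simp [hc, List.takeWhile]
      · simp only [if_neg hc, List.headD_cons, List.takeWhile_cons, hc]
        simp [hc]
        simpa using ih

-- the one-pass scan with '.'-handling, on an already-extracted local part
def pvDotTitle : Bool → List Char → List Char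
  | _, [] => []
  | prev, c :: r =>
    if c = '.' then ' ' :: pvDotTitle false r
    else if PySem.Chars.isalpha c then
      (if prev then PySem.Chars.lowerChar c else PySem.Chars.upperChar c) :: pvDotTitle true r
    else c :: pvDotTitle false r

-- B's scan stops at '@': it is the '.'-aware scan of the part before the first '@'
theorem pv_altGo_eq (cs : List Char) : ∀ prev,
    pvAltGo prev cs = pvDotTitle prev (cs.takeWhile (· ≠ '@')) := by
  induction cs with
  | nil => intro prev; simp [pvAltGo, pvDotTitle]
  | cons c r ih =>
    intro prev
    by_cases hc : c = '@'
    · simp [pvAltGo, hc, List.takeWhile, pvDotTitle]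
    · have ht : List.takeWhile (fun x => decide (x ≠ '@')) (c :: r) =
          c :: List.takeWhile (fun x => decide (x ≠ '@')) r := by
        simp [List.takeWhile_cons, hc]
      rw [ht]
      simp only [pvAltGo, pvDotTitle, if_neg hc]
      split_ifs <;> simp [ih]

-- join-with-space of per-piece title over split('.') is the one-pass scan
theorem pv_main (ns : List Char) : ∀ (prev : Bool) (h : List Char) (t : List (List Char)),
    pvSplit '.' ns = h :: t →
    PySem.Chars.join [' '] (pvTitleGo prev h :: t.map pvTitle) = pvDotTitle prev ns := by
  induction ns with
  | nil =>
    intro prev h t hs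
    simp only [pvSplit, List.cons.injEq] at hs
    obtain ⟨h1, h2⟩ := hs
    subst h1; subst h2
    simp [PySem.Chars.join, pvTitleGo, pvDotTitle, List.intercalate]
  | cons c r ih =>
    intro prev h t hs
    have hjoin : ∀ (x : Char) (xs : List Char) (ts : List (List Char)),
        PySem.Chars.join [' '] ((x :: xs) :: ts) = x :: PySem.Chars.join [' '] (xs :: ts) := by
      intro x xs ts
      cases ts <;> simp [PySem.Chars.join, List.intercalate]
    cases hr : pvSplit '.' r with
    | nil => exact absurd hr (pvSplit_ne_nil '.' r)
    | cons h0 t0 =>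
      simp only [pvSplit, hr] at hs
      by_cases hc : c = '.'
      · rw [if_pos hc] at hs
        injection hs with e1 e2
        subst e1; subst e2; subst hc
        have hmain := ih false h0 t0 hr
        have hstep : PySem.Chars.join [' '] ([] :: pvTitle h0 :: t0.map pvTitle)
             = ' ' :: PySem.Chars.join [' '] (pvTitleGo false h0 :: t0.map pvTitle) := by
          simp [PySem.Chars.join, List.intercalate, pvTitle]
        simp only [pvTitleGo, List.map_cons, pvTitle] at hstep ⊢
        rw [hstep, hmain]
        simp [pvDotTitle]
      · rw [if_neg hc] at hs
        injection hs with e1 e2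
        subst e1; subst e2
        by_cases ha : PySem.Chars.isalpha c = true
        · have hmain := ih true h0 t0 hr
          simp only [pvTitleGo, pvDotTitle, ha, if_true, if_neg hc, hjoin, hmain]
        · have hmain := ih false h0 t0 hr
          simp only [pvTitleGo, pvDotTitle, ha, Bool.false_eq_true, if_false, if_neg hc, hjoin, hmain]

-- ===== VERDICT (by name: the statement is the Claim_ definition above) =====
theorem separate_name_from_email_spec : Claim_equal_separate_name_from_email := by
  intro email _
  unfold Spec_separate_name_from_email separate_name_from_email separate_name_from_email_alt
  have h1 : (PySem.Chars.splitOn email.toList ['@']).headD [] =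
      email.toList.takeWhile (· ≠ '@') := by
    rw [pv_splitOn_eq, pv_head_split_at]
  rw [h1, pv_altGo_eq email.toList false]
  dsimp only
  cases hs : pvSplit '.' (email.toList.takeWhile (· ≠ '@')) with
  | nil => exact absurd hs (pvSplit_ne_nil '.' _)
  | cons h t =>
    rw [pv_splitOn_eq, hs]
    have := pv_main (email.toList.takeWhile (· ≠ '@')) false h t hs
    simp only [List.map_cons, pvTitle] at this ⊢
    rw [this]
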